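-- pv_equiv track=rewrite | github.com/Jeonghoon2/Coding-once-a-day | 프로그래머스/Lv.1/과일 장수.py | solution
-- ===== SOURCE A (Python) =====
-- def solution(k, m, score):
--     answer = 0
--     score.sort(reverse=True)
--     e = []
--
--     while True:
--
--         if len(e) == m:
--             answer += e.pop(-1) * m
--             e.clear()
--
--         if len(score) == 0:
--             break
--
--         e.append(score.pop(0))
--
--     return answer
-- ===== SOURCE B (Python) =====
-- def solution(k, m, score):
--     s = sorted(score, reverse=True)
--     return m * sum(s[i] for i in range(m - 1, len(s), m))
-- ===== Notes on version B (the rewrite author's own statement) =====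
-- stated objective: faster
-- what changed: Replaces the O(n^2) while-loop that pops score[0] one element at a time into a temporary box with a direct O(n log n) sort plus strided indexing s[m-1::m] that reads each box's minimum directly.
import Mathlib
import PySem

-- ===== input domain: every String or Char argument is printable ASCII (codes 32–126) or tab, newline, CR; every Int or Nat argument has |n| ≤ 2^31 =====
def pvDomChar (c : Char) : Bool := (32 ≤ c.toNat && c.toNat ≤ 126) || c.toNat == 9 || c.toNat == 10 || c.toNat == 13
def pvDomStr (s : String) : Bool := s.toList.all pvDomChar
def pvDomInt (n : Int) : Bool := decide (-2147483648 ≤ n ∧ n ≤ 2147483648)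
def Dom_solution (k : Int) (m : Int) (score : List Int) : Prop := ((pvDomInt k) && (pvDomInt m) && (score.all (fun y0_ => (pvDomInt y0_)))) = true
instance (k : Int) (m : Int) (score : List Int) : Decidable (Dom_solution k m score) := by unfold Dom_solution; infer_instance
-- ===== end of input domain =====

-- B changes the algorithm (sort + strided indexing instead of the pop(0) loop); note A also
-- sorts `score` in place and empties it by pop(0) — the equivalence here is about the RETURN value only.

-- ===== PORT A =====
-- the while-loop of A: state = (answer, e, remaining score); each call first performs the
-- "if len(e) == m" step, then either breaks (score empty) or moves score[0] into e.
-- e.pop(-1) is e.getLastD 0: when the branch fires len(e) = m ≥ 1 (m = 0 is excluded by Pre_,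
-- Python raises IndexError there), so e is nonempty and the default is never used.
def solutionLoop (m : Int) (answer : Int) (e : List Int) (s : List Int) : Int :=
  let p : Int × List Int :=
    if ((e.length : Int) == m) then (answer + e.getLastD 0 * m, []) else (answer, e)
  match s with
  | [] => p.1
  | h :: t => solutionLoop m p.1 (p.2 ++ [h]) t

def solution (k : Int) (m : Int) (score : List Int) : Int :=
  solutionLoop m 0 [] (PySem.List.sorted score (fun x => x) true)

-- ===== PORT B =====
def solution_alt (k : Int) (m : Int) (score : List Int) : Int :=
  let s := PySem.List.sorted score (fun x => x) true
  m * ((PySem.List.pyRange (m - 1) (s.length : Int) m).foldl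
        (fun acc i => acc + PySem.List.pyGetD s i 0) 0)

-- ===== PRECONDITION & SPEC =====
-- m = 0 is excluded: there Python A raises IndexError (e.pop(-1) on the empty box) and
-- Python B raises ValueError (range step 0).
def Pre_solution (k : Int) (m : Int) (score : List Int) : Prop := m ≠ 0
instance (k : Int) (m : Int) (score : List Int) : Decidable (Pre_solution k m score) := by unfold Pre_solution; infer_instance
def pvWitness_solution : Int × Int × List Int := (4, 3, [1, 2, 3, 1, 2, 3, 1])
def Spec_solution (k : Int) (m : Int) (score : List Int) (out : Int) : Prop := out = solution_alt k m score
instance (k : Int) (m : Int) (score : List Int) (out : Int) : Decidable (Spec_solution k m score out) := by unfold Spec_solution; infer_instance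

-- ===== CLAIM (what is proved, stated in full; the proofs are below) =====
def Claim_equal_solution : Prop := ∀ (k : Int) (m : Int) (score : List Int), Dom_solution k m score → Pre_solution k m score → Spec_solution k m score (solution k m score)

-- ===== LEMMAS AND PROOFS =====

-- common intermediate: sum of (last element of each full chunk of size m) * m
def chunkSum (mn : Nat) (l : List Int) : Int :=
  if h : mn ≤ l.length ∧ 0 < mn then
    (l.take mn).getLastD 0 * mn + chunkSum mn (l.drop mn)
  else 0
termination_by l.length
decreasing_by simp; omega

theorem chunkSum_small {mn : Nat} {l : List Int} (h : l.length < mn) : chunkSum mn l = 0 := by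
  rw [chunkSum]; simp; omega

theorem chunkSum_step {mn : Nat} {e : List Int} (he : e.length = mn) (hm : 0 < mn)
    (t : List Int) : chunkSum mn (e ++ t) = e.getLastD 0 * mn + chunkSum mn t := by
  rw [chunkSum]
  have h1 : (e ++ t).take mn = e := by
    rw [← he, List.take_left]
  have h2 : (e ++ t).drop mn = t := by
    rw [← he, List.drop_left]
  simp only [h1, h2]
  rw [dif_pos ⟨by simp [← he], hm⟩]

-- A's loop, negative m: the "len(e) == m" branch never fires, answer is returned unchanged
theorem solutionLoop_neg {m : Int} (hm : m < 0) (answer : Int) (e s : List Int) :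
    solutionLoop m answer e s = answer := by
  induction s generalizing answer e with
  | nil =>
    rw [solutionLoop]
    have : ¬ ((e.length : Int) == m) = true := by simp; omega
    simp [this]
  | cons h t ih =>
    rw [solutionLoop]
    have : ¬ ((e.length : Int) == m) = true := by simp; omega
    simp only [this, if_neg, Bool.false_eq_true, if_false]
    exact ih _ _

-- A's loop invariant for positive m
theorem solutionLoop_eq_chunkSum {mn : Nat} (hm : 0 < mn) (answer : Int) (e s : List Int)
    (he : e.length ≤ mn) :
    solutionLoop (mn : Int) answer e s = answer + chunkSum mn (e ++ s) := by
  induction s generalizing answer e with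
  | nil =>
    rw [solutionLoop]
    by_cases hlen : e.length = mn
    · have hb : ((e.length : Int) == (mn : Int)) = true := by simp [hlen]
      simp only [hb, if_pos, List.append_nil]
      have hstep : chunkSum mn e = e.getLastD 0 * mn + chunkSum mn [] := by
        simpa using chunkSum_step hlen hm []
      rw [hstep, chunkSum_small (by simp [hm])]
      push_cast [hlen]; ring
    · have hb : ¬ ((e.length : Int) == (mn : Int)) = true := by simp; omega
      simp only [hb, if_neg, Bool.false_eq_true, if_false, List.append_nil]
      rw [chunkSum_small (by omega)]; ring
  | cons h t ih =>
    rw [solutionLoop]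
    by_cases hlen : e.length = mn
    · have hb : ((e.length : Int) == (mn : Int)) = true := by simp [hlen]
      simp only [hb, if_pos]
      rw [ih _ ([] ++ [h]) (by simp; omega)]
      simp only [List.nil_append]
      rw [show e ++ h :: t = e ++ ((h :: t) : List Int) from rfl,
          chunkSum_step hlen hm (h :: t)]
      push_cast [hlen]; simp; ring
    · have hb : ¬ ((e.length : Int) == (mn : Int)) = true := by simp; omega
      simp only [hb, if_neg, Bool.false_eq_true, if_false]
      rw [ih _ (e ++ [h]) (by simp; omega)]
      simp
  termination_by s.length

-- pyRange with a positive step, induction forms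
theorem pyRange_pos_nil {a b m : Int} (hm : 0 < m) (h : b ≤ a) :
    PySem.List.pyRange a b m = [] := by
  rw [PySem.List.pyRange_of_pos _ _ hm]
  rw [if_neg (by omega)]
  simp

theorem pyRange_pos_cons {a b m : Int} (hm : 0 < m) (h : a < b) :
    PySem.List.pyRange a b m = a :: PySem.List.pyRange (a + m) b m := by
  rw [PySem.List.pyRange_of_pos _ _ hm, PySem.List.pyRange_of_pos _ _ hm]
  rw [if_pos h]
  by_cases h2 : a + m < b
  · rw [if_pos h2]
    have hcnt : ((b - a + m - 1) / m) = ((b - (a + m) + m - 1) / m) + 1 := by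
      have : b - a + m - 1 = (b - (a + m) + m - 1) + 1 * m := by ring
      rw [this, Int.add_mul_ediv_right _ _ (by omega : m ≠ 0)]
    rw [hcnt]
    have hge : 0 ≤ (b - (a + m) + m - 1) / m := Int.ediv_nonneg (by omega) (by omega)
    rw [show ((b - (a + m) + m - 1) / m + 1).toNat = ((b - (a + m) + m - 1) / m).toNat + 1 by omega]
    rw [List.range_succ_eq_map]
    simp [Function.comp_def]
    intro k _
    ring
  · rw [if_neg h2]
    have h1 : (b - a + m - 1) / m = 1 := by
      have he : b - a + m - 1 = (b - a - 1) + 1 * m := by ring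
      rw [he, Int.add_mul_ediv_right _ _ (by omega : m ≠ 0),
          Int.ediv_eq_zero_of_lt (by omega) (by omega)]
      norm_num
    rw [h1]
    simp

theorem pyRange_neg_nil {a b m : Int} (hm : m < 0) (h : a ≤ b) :
    PySem.List.pyRange a b m = [] := by
  unfold PySem.List.pyRange
  rw [if_neg (by omega)]
  simp only
  rw [if_neg (by omega), if_neg (by omega)]
  simp

-- B's strided fold equals a shifted sum; relate it to chunkSum
theorem foldl_add_eq (l : List Int) (f : Int → Int) (init : Int) :
    l.foldl (fun acc i => acc + f i) init = init + l.foldl (fun acc i => acc + f i) 0 := by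
  induction l generalizing init with
  | nil => simp
  | cons h t ih => simp only [List.foldl_cons]; rw [ih (init + f h), ih (0 + f h)]; ring

theorem strided_eq_chunkSum {mn : Nat} (hm : 0 < mn) (s : List Int) :
    (mn : Int) * ((PySem.List.pyRange ((mn : Int) - 1) (s.length : Int) (mn : Int)).foldl
      (fun acc i => acc + PySem.List.pyGetD s i 0) 0) = chunkSum mn s := by
  by_cases hlen : s.length < mn
  · rw [pyRange_pos_nil (by exact_mod_cast hm) (by push_cast; omega)]
    rw [chunkSum_small hlen]
    simp
  · -- s.length ≥ mn: split off the first chunk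
    push_neg at hlen
    rw [pyRange_pos_cons (by exact_mod_cast hm) (by push_cast; omega)]
    have hchunk : chunkSum mn s = (s.take mn).getLastD 0 * mn + chunkSum mn (s.drop mn) := by
      conv_lhs => rw [← List.take_append_drop mn s]
      exact chunkSum_step (by simp; omega) hm _
    rw [hchunk]
    rw [List.foldl_cons]
    rw [foldl_add_eq]
    -- value at index mn - 1
    have hget : PySem.List.pyGetD s ((mn : Int) - 1) 0 = (s.take mn).getLastD 0 := by
      have h1 : ((mn : Int) - 1) = ((mn - 1 : Nat) : Int) := by push_cast; omega
      rw [h1, PySem.List.pyGetD_natCast]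
      have h2 : mn - 1 < s.length := by omega
      have hlen2 : (s.take mn).length = mn := by simp; omega
      have h3 : (s.take mn).getLastD 0 = (s.take mn).getD (mn - 1) 0 := by
        rw [List.getLastD_eq_getLast?, List.getLast?_eq_getElem?, hlen2]
        simp [List.getD]
      rw [h3]
      simp [List.getD, List.getElem?_take, show mn - 1 < mn by omega]
    -- the tail of the range indexes into the dropped list
    have htail : (PySem.List.pyRange ((mn : Int) - 1 + mn) (s.length : Int) mn).foldl
        (fun acc i => acc + PySem.List.pyGetD s i 0) 0
        = (PySem.List.pyRange ((mn : Int) - 1) ((s.drop mn).length : Int) mn).foldl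
        (fun acc i => acc + PySem.List.pyGetD (s.drop mn) i 0) 0 := by
      have hshift : PySem.List.pyRange ((mn : Int) - 1 + mn) (s.length : Int) mn
          = (PySem.List.pyRange ((mn : Int) - 1) ((s.drop mn).length : Int) mn).map
              (fun i => i + (mn : Int)) := by
        rw [PySem.List.pyRange_of_pos _ _ (by exact_mod_cast hm : (0:Int) < mn),
            PySem.List.pyRange_of_pos _ _ (by exact_mod_cast hm : (0:Int) < mn)]
        simp only [List.map_map]
        have hL : ((s.drop mn).length : Int) = (s.length : Int) - mn := by simp; omega
        rw [hL]
        by_cases hc : (mn : Int) - 1 + mn < s.length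
        · rw [if_pos hc, if_pos (by omega)]
          have : (s.length : Int) - ((mn : Int) - 1 + mn) + mn - 1
              = (s.length : Int) - mn - ((mn : Int) - 1) + mn - 1 := by ring
          rw [this]
          apply List.map_congr_left; intro k _; simp [Function.comp_def]; ring
        · rw [if_neg hc, if_neg (by omega)]
          simp
      rw [hshift, List.foldl_map]
      apply PySem.List.foldl_congr_mem
      intro acc i hi
      congr 1
      have hmem := (PySem.List.mem_pyRange_iff_of_pos
        (by exact_mod_cast hm : (0:Int) < mn) i).mp hi
      have hi0 : 0 ≤ i := by omega
      have hilt : i < ((s.drop mn).length : Int) := hmem.2.1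
      rw [show i + (mn : Int) = ((i.toNat + mn : Nat) : Int) by push_cast; omega,
          show i = ((i.toNat : Nat) : Int) by omega,
          PySem.List.pyGetD_natCast, PySem.List.pyGetD_natCast]
      have : i.toNat < (s.drop mn).length := by omega
      simp [List.getD, List.getElem?_drop]
      congr 2
      omega
    rw [htail]
    have hrec := strided_eq_chunkSum hm (s.drop mn)
    rw [show (0 : Int) + PySem.List.pyGetD s ((mn : Int) - 1) 0
        = PySem.List.pyGetD s ((mn : Int) - 1) 0 by ring]
    rw [hget]
    rw [mul_add, hrec]
    ring
  termination_by s.length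
  decreasing_by simp; omega

-- ===== VERDICT (by name: the statement is the Claim_ definition above) =====
theorem solution_spec : Claim_equal_solution := by
  intro k m score _ hpre
  unfold Spec_solution solution solution_alt
  simp only []
  generalize PySem.List.sorted score (fun x => x) true = s
  rcases lt_trichotomy m 0 with hneg | hzero | hpos
  · rw [solutionLoop_neg hneg]
    rw [pyRange_neg_nil hneg (by omega : m - 1 ≤ (s.length : Int))]
    simp
  · exact absurd hzero hpre
  · obtain ⟨mn, rfl⟩ : ∃ mn : Nat, m = (mn : Int) := ⟨m.toNat, by omega⟩
    have hmn : 0 < mn := by exact_mod_cast hpos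
    rw [solutionLoop_eq_chunkSum hmn 0 [] s (by simp [hmn])]
    rw [strided_eq_chunkSum hmn s]
    simp
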